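-- pv_equiv track=rewrite | github.com/WinterFramework/winter | winter_openapi/generator.py | determine_path_prefix
-- ===== SOURCE A (Python) =====
-- from typing import List
--
-- def determine_path_prefix(url_paths: List[str]) -> str:
--     """
--     https://github.com/encode/django-rest-framework/blob/master/LICENSE.md
--     THIS SOFTWARE IS PROVIDED BY THE COPYRIGHT HOLDERS AND CONTRIBUTORS "AS IS" AND ANY EXPRESS OR IMPLIED WARRANTIES,
--     INCLUDING, BUT NOT LIMITED TO, THE IMPLIED WARRANTIES OF MERCHANTABILITY AND FITNESS FOR A PARTICULAR PURPOSE ARE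
--     DISCLAIMED. IN NO EVENT SHALL THE COPYRIGHT HOLDER OR CONTRIBUTORS BE LIABLE FOR ANY DIRECT, INDIRECT, INCIDENTAL,
--     SPECIAL, EXEMPLARY, OR CONSEQUENTIAL DAMAGES (INCLUDING, BUT NOT LIMITED TO, PROCUREMENT OF SUBSTITUTE GOODS OR
--     SERVICES; LOSS OF USE, DATA, OR PROFITS; OR BUSINESS INTERRUPTION) HOWEVER CAUSED AND ON ANY THEORY OF LIABILITY,
--     WHETHER IN CONTRACT, STRICT LIABILITY, OR TORT (INCLUDING NEGLIGENCE OR OTHERWISE) ARISING IN ANY WAY OUT OF THE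
--     USE OF THIS SOFTWARE, EVEN IF ADVISED OF THE POSSIBILITY OF SUCH DAMAGE.
--
--     Given a list of all paths, return the common prefix which should be
--     discounted when generating a schema structure.
--
--     This will be the longest common string that does not include that last
--     component of the URL, or the last component before a path parameter.
--
--     For example:
--
--     /api/v1/users/
--     /api/v1/users/{pk}/
--
--     The path prefix is '/api/v1'
--     """
--     prefixes = []
--     for path in url_paths:
--         components = path.strip('/').split('/')
--         initial_components = []
--         for component in components:
--             if '{' in component:
--                 break
--             initial_components.append(component)
--         prefix = '/'.join(initial_components[:-1])
--         if not prefix: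
--             # We can just break early in the case that there's at least
--             # one URL that doesn't have a path prefix.
--             return '/'
--         prefixes.append('/' + prefix + '/')
--
--     split_paths = [path.strip('/').split('/') for path in prefixes]
--     s1 = min(split_paths)
--     s2 = max(split_paths)
--     common = s1
--
--     for i, c in enumerate(s1):
--         if c != s2[i]:
--             common = s1[:i]
--             break
--
--     return '/' + '/'.join(common)
-- ===== SOURCE B (Python) =====
-- from typing import List
--
--
-- def _static_prefix(path: str) -> str:
--     comps = path.strip('/').split('/')
--     keep = []
--     for c in comps:
--         if '{' in c:
--             break
--         keep.append(c)
--     return '/'.join(keep[:-1])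
--
--
-- def determine_path_prefix(url_paths: List[str]) -> str:
--     if not url_paths:
--         raise ValueError('determine_path_prefix: empty url_paths')
--     prefixes = [_static_prefix(p) for p in url_paths]
--     if '' in prefixes:
--         return '/'
--     first, *rest = [p.strip('/').split('/') for p in prefixes]
--     common = []
--     for i, c in enumerate(first):
--         if any(len(q) <= i or q[i] != c for q in rest):
--             break
--         common.append(c)
--     return '/' + '/'.join(common)
-- ===== Notes on version B (the rewrite author's own statement) =====
-- stated objective: alternative
-- what changed: Phase 2 replaces the sort-free min/max lexicographic trick (common prefix of the lexicographically smallest and largest prefix lists) by a direct columnar scan of the first prefix list against all the others, stopping at the first column where any list disagrees; phase 1 is restructured as a per-path helper plus a membership test instead of an accumulating loop with an early return.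
import Mathlib
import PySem

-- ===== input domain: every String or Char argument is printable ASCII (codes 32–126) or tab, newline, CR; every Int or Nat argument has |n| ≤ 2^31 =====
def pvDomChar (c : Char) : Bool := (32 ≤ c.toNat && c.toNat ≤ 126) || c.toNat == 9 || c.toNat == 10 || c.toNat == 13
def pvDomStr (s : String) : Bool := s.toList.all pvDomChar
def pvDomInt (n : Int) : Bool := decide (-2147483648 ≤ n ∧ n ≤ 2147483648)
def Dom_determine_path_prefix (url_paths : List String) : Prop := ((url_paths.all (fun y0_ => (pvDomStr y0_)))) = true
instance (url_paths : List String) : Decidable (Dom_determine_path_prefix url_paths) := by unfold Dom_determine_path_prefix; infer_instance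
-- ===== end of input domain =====

-- B replaces A's min/max lexicographic trick by a direct columnar scan of the first
-- prefix list against the others (alternative decomposition, same cost).

-- ===== PORT A =====
-- inner loop: append components until one contains '{'
def pvAInit : List String → List String
  | [] => []
  | c :: rest => if PySem.Str.isIn "{" c then [] else c :: pvAInit rest

-- prefix = '/'.join(initial_components[:-1]) with components = path.strip('/').split('/')
def pvAPrefix (path : String) : String :=
  PySem.Str.join "/" (PySem.List.slice (pvAInit (((PySem.Str.split? (PySem.Str.stripChars path "/") "/").getD []))) none (some (-1)))

-- phase-1 loop; `none` encodes the early `return '/'`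
def pvALoop : List String → List String → Option (List String)
  | acc, [] => some acc
  | acc, path :: rest =>
    if pvAPrefix path = "" then none
    else pvALoop (acc ++ ["/" ++ pvAPrefix path ++ "/"]) rest

-- `for i, c in enumerate(s1): if c != s2[i]: common = s1[:i]; break` (common = s1 when no break;
-- the `none` branch is Python's IndexError, unreachable because s1 = min ≤ max = s2)
def pvAScan : Nat → List String → List String → List String → List String
  | _, s1full, [], _ => s1full
  | i, s1full, c :: cs, s2 =>
    match PySem.List.pyGet? s2 (i : Int) with
    | some x => if c ≠ x then PySem.List.slice s1full none (some (i : Int)) else pvAScan (i + 1) s1full cs s2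
    | none => PySem.List.slice s1full none (some (i : Int))

-- phase 2: split_paths, s1 = min, s2 = max, scan (the fall-through arm is Python's
-- ValueError from min([]), reached only for url_paths = [], excluded by Pre_)
def pvAPhase2 (prefixes : List String) : String :=
  let split_paths := prefixes.map (fun p => ((PySem.Str.split? (PySem.Str.stripChars p "/") "/").getD []))
  match PySem.List.min? split_paths id, PySem.List.max? split_paths id with
  | some s1, some s2 => "/" ++ PySem.Str.join "/" (pvAScan 0 s1 s1 s2)
  | _, _ => "/"

def determine_path_prefix (url_paths : List String) : String :=
  match pvALoop [] url_paths with
  | none => "/"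
  | some prefixes => pvAPhase2 prefixes

-- ===== PORT B =====
-- `keep` accumulator loop of _static_prefix
def pvBKeep : List String → List String → List String
  | acc, [] => acc
  | acc, c :: rest => if PySem.Str.isIn "{" c then acc else pvBKeep (acc ++ [c]) rest

def pvBStaticPrefix (path : String) : String :=
  PySem.Str.join "/" (PySem.List.slice (pvBKeep [] (((PySem.Str.split? (PySem.Str.stripChars path "/") "/").getD []))) none (some (-1)))

-- columnar scan: keep column i while every other list agrees with the first
def pvBScan : Nat → List String → List (List String) → List String
  | _, [], _ => []
  | i, c :: cs, rest =>
    if rest.any (fun q => decide (q.length ≤ i) || (PySem.List.pyGet? q (i : Int) != some c)) then []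
    else c :: pvBScan (i + 1) cs rest

-- first, *rest = split_paths; columnar scan of first against rest
-- (the [] arm is unreachable: url_paths is nonempty whenever it is evaluated)
def pvBCommon : List (List String) → String
  | [] => "/"
  | first :: rest => "/" ++ PySem.Str.join "/" (pvBScan 0 first rest)

def determine_path_prefix_alt (url_paths : List String) : String :=
  if url_paths.isEmpty then "/"   -- Source B raises ValueError here, excluded by Pre_
  else
    let prefixes := url_paths.map pvBStaticPrefix
    if prefixes.contains "" then "/"
    else pvBCommon (prefixes.map (fun p => ((PySem.Str.split? (PySem.Str.stripChars p "/") "/").getD [])))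

-- ===== PRECONDITION & SPEC =====
-- Pre_ excludes only the empty list, on which both A and B raise ValueError (min() of an empty sequence in A).
def Pre_determine_path_prefix (url_paths : List String) : Prop := url_paths ≠ []
instance (url_paths : List String) : Decidable (Pre_determine_path_prefix url_paths) := by unfold Pre_determine_path_prefix; infer_instance

def pvWitness_determine_path_prefix : List String := ["/api/v1/users/", "/api/v1/users/{pk}/"]

def Spec_determine_path_prefix (url_paths : List String) (out : String) : Prop := out = determine_path_prefix_alt url_paths
instance (url_paths : List String) (out : String) : Decidable (Spec_determine_path_prefix url_paths out) := by unfold Spec_determine_path_prefix; infer_instance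

-- ===== CLAIM (what is proved, stated in full; the proofs are below) =====
def Claim_equal_determine_path_prefix : Prop := ∀ (url_paths : List String), Dom_determine_path_prefix url_paths → Pre_determine_path_prefix url_paths → Spec_determine_path_prefix url_paths (determine_path_prefix url_paths)

-- ===== LEMMAS AND PROOFS =====

-- longest common prefix of two lists (proof-side characterisation of both scans)
def pvLcp : List String → List String → List String
  | x :: xs, y :: ys => if x = y then x :: pvLcp xs ys else []
  | _, _ => []

theorem pvLcp_prefix_left : ∀ (x y : List String), pvLcp x y <+: x := by
  intro x
  induction x with
  | nil => intro y; cases y <;> simp [pvLcp]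
  | cons a xs ih =>
    intro y
    cases y with
    | nil => simp [pvLcp]
    | cons b ys =>
      by_cases h : a = b <;> simp [pvLcp, h, ih]

theorem pvLcp_prefix_right : ∀ (x y : List String), pvLcp x y <+: y := by
  intro x
  induction x with
  | nil => intro y; cases y <;> simp [pvLcp]
  | cons a xs ih =>
    intro y
    cases y with
    | nil => simp [pvLcp]
    | cons b ys =>
      by_cases h : a = b
      · subst h; simp [pvLcp, ih]
      · simp [pvLcp, h]

theorem pvLcp_greatest : ∀ (v x y : List String), v <+: x → v <+: y → v <+: pvLcp x y := by
  intro v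
  induction v with
  | nil => intro x y _ _; exact List.nil_prefix
  | cons a v' ih =>
    intro x y hx hy
    cases x with
    | nil => exact absurd (List.IsPrefix.length_le hx) (by simp)
    | cons b xs =>
      cases y with
      | nil => exact absurd (List.IsPrefix.length_le hy) (by simp)
      | cons c ys =>
        rw [List.cons_prefix_cons] at hx hy
        obtain ⟨hab, hx'⟩ := hx
        obtain ⟨hac, hy'⟩ := hy
        subst hab; subst hac
        simp [pvLcp, List.cons_prefix_cons]
        exact ih _ _ hx' hy'

theorem pv_prefix_antisymm {u v : List String} (h1 : u <+: v) (h2 : v <+: u) : u = v := by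
  have hl : u.length = v.length := Nat.le_antisymm h1.length_le h2.length_le
  rw [List.prefix_iff_eq_take] at h1
  rw [h1, hl, List.take_length]

-- between two lex-ordered lists, a common prefix of the extremes is a prefix of everything in between
theorem pv_lex_between : ∀ (v s1 s2 p : List String), v <+: s1 → v <+: s2 →
    ¬ p < s1 → ¬ s2 < p → v <+: p := by
  intro v
  induction v with
  | nil => intro _ _ p _ _ _ _; exact List.nil_prefix
  | cons a v' ih =>
    intro s1 s2 p h1 h2 hp1 hp2
    cases s1 with
    | nil => exact absurd (List.IsPrefix.length_le h1) (by simp)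
    | cons x s1' =>
      cases s2 with
      | nil => exact absurd (List.IsPrefix.length_le h2) (by simp)
      | cons y s2' =>
        rw [List.cons_prefix_cons] at h1 h2
        obtain ⟨hax, h1'⟩ := h1
        obtain ⟨hay, h2'⟩ := h2
        subst hax
        subst hay
        cases p with
        | nil => exact absurd ((List.lt_iff_lex_lt _ _).mpr List.Lex.nil) hp1
        | cons z p' =>
          rcases lt_trichotomy z a with hza | hza | hza
          · exact absurd ((List.lt_iff_lex_lt _ _).mpr (List.Lex.rel hza)) hp1
          · subst hza
            rw [List.cons_prefix_cons]
            refine ⟨rfl, ih s1' s2' p' h1' h2' ?_ ?_⟩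
            · intro hlt
              exact hp1 ((List.lt_iff_lex_lt _ _).mpr
                (List.Lex.cons ((List.lt_iff_lex_lt _ _).mp hlt)))
            · intro hlt
              exact hp2 ((List.lt_iff_lex_lt _ _).mpr
                (List.Lex.cons ((List.lt_iff_lex_lt _ _).mp hlt)))
          · exact absurd ((List.lt_iff_lex_lt _ _).mpr (List.Lex.rel hza)) hp2

-- ----- min?/max? of the elaborated instances: membership and extremality -----
theorem pvMin_cons (a x : List String) (xs : List (List String)) :
    PySem.List.min? (a :: x :: xs) id = PySem.List.min? ((if x < a then x else a) :: xs) id := by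
  by_cases h : x < a <;> simp [PySem.List.min?, h]

theorem pvMin_single (a : List String) : PySem.List.min? [a] id = some a := by
  simp [PySem.List.min?]

theorem pvMin_spec : ∀ (xs : List (List String)) (x : List String),
    ∃ m, PySem.List.min? (x :: xs) id = some m ∧ m ∈ x :: xs ∧ ∀ y ∈ x :: xs, ¬ y < m := by
  intro xs
  induction xs with
  | nil =>
    intro x
    exact ⟨x, pvMin_single x, by simp, by simp⟩
  | cons x' xs ih =>
    intro x
    obtain ⟨m, hm, hmem, hall⟩ := ih (if x' < x then x' else x)
    refine ⟨m, by rw [pvMin_cons]; exact hm, ?_, ?_⟩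
    · rcases List.mem_cons.mp hmem with h | h
      · by_cases hx : x' < x <;> simp [hx] at h <;> simp [h]
      · simp [h]
    · have hc := hall _ List.mem_cons_self
      intro y hy
      rcases List.mem_cons.mp hy with rfl | hy'
      · by_cases hx : x' < y
        · simp only [hx, if_pos] at hc
          intro hym; exact hc (lt_trans hx hym)
        · simpa [hx] using hc
      · rcases List.mem_cons.mp hy' with rfl | hy''
        · by_cases hx : y < x
          · simpa [hx] using hc
          · simp only [hx, if_false] at hc
            intro hym
            exact hx (lt_of_lt_of_le hym (not_lt.mp hc))
        · exact hall y (List.mem_cons_of_mem _ hy'')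

theorem pvMax_cons (a x : List String) (xs : List (List String)) :
    PySem.List.max? (a :: x :: xs) id = PySem.List.max? ((if a < x then x else a) :: xs) id := by
  by_cases h : a < x <;> simp [PySem.List.max?, h]

theorem pvMax_single (a : List String) : PySem.List.max? [a] id = some a := by
  simp [PySem.List.max?]

theorem pvMax_spec : ∀ (xs : List (List String)) (x : List String),
    ∃ m, PySem.List.max? (x :: xs) id = some m ∧ m ∈ x :: xs ∧ ∀ y ∈ x :: xs, ¬ m < y := by
  intro xs
  induction xs with
  | nil =>
    intro x
    exact ⟨x, pvMax_single x, by simp, by simp⟩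
  | cons x' xs ih =>
    intro x
    obtain ⟨m, hm, hmem, hall⟩ := ih (if x < x' then x' else x)
    refine ⟨m, by rw [pvMax_cons]; exact hm, ?_, ?_⟩
    · rcases List.mem_cons.mp hmem with h | h
      · by_cases hx : x < x' <;> simp [hx] at h <;> simp [h]
      · simp [h]
    · have hc := hall _ List.mem_cons_self
      intro y hy
      rcases List.mem_cons.mp hy with rfl | hy'
      · by_cases hx : y < x'
        · simp only [hx, if_pos] at hc
          intro hym; exact hc (lt_trans hym hx)
        · simpa [hx] using hc
      · rcases List.mem_cons.mp hy' with rfl | hy''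
        · by_cases hx : x < y
          · simpa [hx] using hc
          · simp only [hx, if_false] at hc
            intro hym
            exact hx (lt_of_le_of_lt (not_lt.mp hc) hym)
        · exact hall y (List.mem_cons_of_mem _ hy'')

-- ----- A's scan computes the pairwise lcp -----
theorem pvAScan_eq_lcp : ∀ (cs : List String) (i : Nat) (s1 s2 : List String),
    List.drop i s1 = cs →
    pvAScan i s1 cs s2 = List.take i s1 ++ pvLcp cs (List.drop i s2) := by
  intro cs
  induction cs with
  | nil =>
    intro i s1 s2 hdrop
    have hlen : s1.length ≤ i := List.drop_eq_nil_iff.mp hdrop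
    simp [pvAScan, pvLcp, List.take_of_length_le hlen]
  | cons c cs' ih =>
    intro i s1 s2 hdrop
    have hs1i : s1[i]? = some c := by
      rw [← List.head?_drop, hdrop]; rfl
    have hilen : i < s1.length := List.getElem?_eq_some_iff.mp hs1i |>.1
    have hdrop' : List.drop (i + 1) s1 = cs' := by
      rw [← List.tail_drop, hdrop]; rfl
    have hget : PySem.List.pyGet? s2 (i : Int) = s2[i]? := PySem.List.pyGet?_natCast s2 i
    by_cases hs2 : i < s2.length
    · have hdrop2 : List.drop i s2 = s2[i] :: List.drop (i + 1) s2 :=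
        List.drop_eq_getElem_cons hs2
      have hx : s2[i]? = some s2[i] := List.getElem?_eq_getElem hs2
      by_cases hc : c = s2[i]
      · have : pvAScan i s1 (c :: cs') s2 = pvAScan (i + 1) s1 cs' s2 := by
          simp [pvAScan, hget, hx, hc]
        rw [this, ih (i + 1) s1 s2 hdrop', hdrop2, ← hc]
        simp [pvLcp, List.take_add_one, hs1i]
      · have : pvAScan i s1 (c :: cs') s2 = PySem.List.slice s1 none (some (i : Int)) := by
          simp [pvAScan, hget, hx, hc]
        rw [this, hdrop2, PySem.List.slice_to s1 (by positivity)]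
        simp [pvLcp, hc]
    · have hx : s2[i]? = none := List.getElem?_eq_none (by omega)
      have hdrop2 : List.drop i s2 = [] := List.drop_eq_nil_of_le (by omega)
      have : pvAScan i s1 (c :: cs') s2 = PySem.List.slice s1 none (some (i : Int)) := by
        simp [pvAScan, hget, hx]
      rw [this, hdrop2, PySem.List.slice_to s1 (by positivity)]
      simp [pvLcp]

-- ----- B's scan: a common prefix of everything, and the greatest one -----
theorem pvBScan_prefix : ∀ (cs : List String) (i : Nat) (rest : List (List String)),
    pvBScan i cs rest <+: cs ∧ ∀ q ∈ rest, pvBScan i cs rest <+: List.drop i q := by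
  intro cs
  induction cs with
  | nil => intro i rest; exact ⟨List.nil_prefix, fun q _ => List.nil_prefix⟩
  | cons c cs' ih =>
    intro i rest
    by_cases hany : rest.any (fun q => decide (q.length ≤ i) || (PySem.List.pyGet? q (i : Int) != some c))
    · have hstep : pvBScan i (c :: cs') rest = [] := by
        simp only [pvBScan]
        rw [if_pos hany]
      rw [hstep]
      exact ⟨List.nil_prefix, fun q _ => List.nil_prefix⟩
    · have hany' : (rest.any (fun q => decide (q.length ≤ i) || (PySem.List.pyGet? q (i : Int) != some c))) = false := by
        simpa using hany
      have hall : ∀ q ∈ rest, List.drop i q = c :: List.drop (i + 1) q := by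
        intro q hq
        have hq0 := List.any_eq_false.mp hany' q hq
        have hq' : (decide (q.length ≤ i) || (PySem.List.pyGet? q (i : Int) != some c)) = false :=
          Bool.eq_false_iff.mpr hq0
        simp only [Bool.or_eq_false_iff, decide_eq_false_iff_not,
          bne_eq_false_iff_eq, PySem.List.pyGet?_natCast] at hq'
        obtain ⟨hi, he⟩ := List.getElem?_eq_some_iff.mp hq'.2
        rw [List.drop_eq_getElem_cons hi, he]
      have hstep : pvBScan i (c :: cs') rest = c :: pvBScan (i + 1) cs' rest := by
        simp only [pvBScan]
        rw [if_neg hany]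
      obtain ⟨ih1, ih2⟩ := ih (i + 1) rest
      constructor
      · rw [hstep, List.cons_prefix_cons]; exact ⟨rfl, ih1⟩
      · intro q hq
        rw [hstep, hall q hq, List.cons_prefix_cons]
        exact ⟨rfl, ih2 q hq⟩

theorem pvBScan_greatest : ∀ (v cs : List String) (i : Nat) (rest : List (List String)),
    v <+: cs → (∀ q ∈ rest, v <+: List.drop i q) → v <+: pvBScan i cs rest := by
  intro v
  induction v with
  | nil => intro _ _ _ _ _; exact List.nil_prefix
  | cons a v' ih =>
    intro cs i rest hcs hrest
    cases cs with
    | nil => exact absurd (List.IsPrefix.length_le hcs) (by simp)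
    | cons c cs' =>
      rw [List.cons_prefix_cons] at hcs
      obtain ⟨hac, hcs'⟩ := hcs
      subst hac
      have hany : rest.any (fun q => decide (q.length ≤ i) || (PySem.List.pyGet? q (i : Int) != some a)) = false := by
        apply List.any_eq_false.mpr
        intro q hq
        have hpre := hrest q hq
        cases hdq : List.drop i q with
        | nil => rw [hdq] at hpre; exact absurd (List.IsPrefix.length_le hpre) (by simp)
        | cons z zs =>
          rw [hdq, List.cons_prefix_cons] at hpre
          obtain ⟨haz, _⟩ := hpre
          have hq? : q[i]? = some z := by rw [← List.head?_drop, hdq]; rfl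
          have hlen : ¬ q.length ≤ i := by
            have := (List.getElem?_eq_some_iff.mp hq?).1; omega
          intro hcontra
          simp only [Bool.or_eq_true, decide_eq_true_eq, bne_iff_ne, ne_eq,
            PySem.List.pyGet?_natCast, hq?] at hcontra
          rcases hcontra with h | h
          · exact hlen h
          · exact h (by rw [haz])
      have hstep : pvBScan i (a :: cs') rest = a :: pvBScan (i + 1) cs' rest := by
        simp only [pvBScan]
        rw [if_neg (by rw [hany]; exact Bool.false_ne_true)]
      rw [hstep, List.cons_prefix_cons]
      refine ⟨rfl, ih cs' (i + 1) rest hcs' ?_⟩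
      intro q hq
      have hpre := hrest q hq
      cases hdq : List.drop i q with
      | nil => rw [hdq] at hpre; exact absurd (List.IsPrefix.length_le hpre) (by simp)
      | cons z zs =>
        rw [hdq, List.cons_prefix_cons] at hpre
        have : List.drop (i + 1) q = zs := by rw [← List.tail_drop, hdq]; rfl
        rw [this]; exact hpre.2

-- ----- phase 1 -----
theorem pvBKeep_eq : ∀ (l acc : List String), pvBKeep acc l = acc ++ pvAInit l := by
  intro l
  induction l with
  | nil => intro acc; simp [pvBKeep, pvAInit]
  | cons c rest ih =>
    intro acc
    by_cases h : PySem.Chars.isIn ['{'] c.toList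
    · simp [pvBKeep, pvAInit, h]
    · simp [pvBKeep, pvAInit, h, ih]

theorem pvBStaticPrefix_eq (path : String) : pvBStaticPrefix path = pvAPrefix path := by
  simp [pvBStaticPrefix, pvAPrefix, pvBKeep_eq]

theorem pvALoop_eq : ∀ (l : List String) (acc : List String),
    pvALoop acc l = if "" ∈ l.map pvAPrefix then none
      else some (acc ++ l.map (fun p => "/" ++ pvAPrefix p ++ "/")) := by
  intro l
  induction l with
  | nil => intro acc; simp [pvALoop]
  | cons path rest ih =>
    intro acc
    by_cases h : pvAPrefix path = ""
    · simp [pvALoop, h]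
    · have h' : ¬ ("" = pvAPrefix path) := fun he => h he.symm
      simp only [pvALoop, h, if_false, ih, List.map_cons, List.mem_cons]
      by_cases hmem : "" ∈ rest.map pvAPrefix
      · simp [hmem, h']
      · simp [hmem, h']

-- ----- stripping the re-wrapped prefix -----
theorem pvStripWrap_chars (t : List Char) :
    PySem.Chars.stripChars ('/' :: (t ++ ['/'])) ['/'] = PySem.Chars.stripChars t ['/'] := by
  have hp : ((fun c => (['/'] : List Char).contains c) '/') = true := by decide
  cases hdw : List.dropWhile (fun c => (['/'] : List Char).contains c) t with
  | nil =>
    simp only [PySem.Chars.stripChars]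
    rw [List.dropWhile_cons_of_pos hp, List.dropWhile_append, hdw]
    simp
  | cons z zs =>
    simp only [PySem.Chars.stripChars]
    rw [List.dropWhile_cons_of_pos hp, List.dropWhile_append, hdw]
    simp only [List.isEmpty_cons, Bool.false_eq_true, if_false]
    rw [List.reverse_append]
    simp only [List.reverse_cons, List.reverse_nil, List.nil_append, List.singleton_append]
    rw [List.dropWhile_cons_of_pos hp]

theorem pvStripWrap (p : String) :
    PySem.Str.stripChars ("/" ++ p ++ "/") "/" = PySem.Str.stripChars p "/" := by
  have h : (PySem.Str.stripChars ("/" ++ p ++ "/") "/").toList = (PySem.Str.stripChars p "/").toList := by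
    rw [PySem.Str.toList_stripChars, PySem.Str.toList_stripChars]
    have : ("/" ++ p ++ "/").toList = '/' :: (p.toList ++ ['/']) := by
      simp [String.toList_append]
    rw [this]
    exact pvStripWrap_chars p.toList
  exact String.toList_injective h

-- ----- main theorem -----
theorem pvAPhase2_congr {p1 p2 : List String}
    (h : p1.map (fun p => ((PySem.Str.split? (PySem.Str.stripChars p "/") "/").getD []))
       = p2.map (fun p => ((PySem.Str.split? (PySem.Str.stripChars p "/") "/").getD []))) :
    pvAPhase2 p1 = pvAPhase2 p2 := by
  simp only [pvAPhase2]
  rw [h]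

theorem pv_main (url_paths : List String) (hne : url_paths ≠ []) :
    determine_path_prefix url_paths = determine_path_prefix_alt url_paths := by
  have hmapB : url_paths.map pvBStaticPrefix = url_paths.map pvAPrefix :=
    List.map_congr_left (fun p _ => pvBStaticPrefix_eq p)
  by_cases hin : "" ∈ url_paths.map pvAPrefix
  · -- some path has no prefix: both return "/"
    have hA : determine_path_prefix url_paths = "/" := by
      unfold determine_path_prefix
      rw [pvALoop_eq, if_pos hin]
    have hB : determine_path_prefix_alt url_paths = "/" := by
      have hc : (url_paths.map pvBStaticPrefix).contains "" = true := by
        rw [hmapB]; exact List.contains_iff_mem.mpr hin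
      unfold determine_path_prefix_alt
      rw [if_neg (by simp [List.isEmpty_iff, hne])]
      simp only [hc, if_true]
    rw [hA, hB]
  · -- no empty prefix: compare the two phase-2 scans
    cases url_paths with
    | nil => exact absurd rfl hne
    | cons u us =>
      have hwrap : ((u :: us).map (fun p => "/" ++ pvAPrefix p ++ "/")).map
            (fun p => ((PySem.Str.split? (PySem.Str.stripChars p "/") "/").getD []))
          = ((u :: us).map pvAPrefix).map
            (fun p => ((PySem.Str.split? (PySem.Str.stripChars p "/") "/").getD [])) := by
        rw [List.map_map, List.map_map]
        refine List.map_congr_left (fun p _ => ?_)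
        simp only [Function.comp_apply]
        rw [pvStripWrap]
      obtain ⟨s1, hs1, hs1mem, hs1min⟩ := pvMin_spec
        ((us.map pvAPrefix).map (fun p => ((PySem.Str.split? (PySem.Str.stripChars p "/") "/").getD [])))
        ((PySem.Str.split? (PySem.Str.stripChars (pvAPrefix u) "/") "/").getD [])
      obtain ⟨s2, hs2, hs2mem, hs2max⟩ := pvMax_spec
        ((us.map pvAPrefix).map (fun p => ((PySem.Str.split? (PySem.Str.stripChars p "/") "/").getD [])))
        ((PySem.Str.split? (PySem.Str.stripChars (pvAPrefix u) "/") "/").getD [])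
      -- A's value
      have hA : determine_path_prefix (u :: us) = "/" ++ PySem.Str.join "/" (pvAScan 0 s1 s1 s2) := by
        unfold determine_path_prefix
        rw [pvALoop_eq, if_neg hin]
        show pvAPhase2 ([] ++ (u :: us).map (fun p => "/" ++ pvAPrefix p ++ "/")) = _
        rw [List.nil_append, pvAPhase2_congr hwrap]
        simp only [pvAPhase2, List.map_cons]
        rw [hs1, hs2]
      -- B's value
      have hB : determine_path_prefix_alt (u :: us)
          = "/" ++ PySem.Str.join "/" (pvBScan 0
              ((PySem.Str.split? (PySem.Str.stripChars (pvAPrefix u) "/") "/").getD [])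
              ((us.map pvAPrefix).map (fun p => ((PySem.Str.split? (PySem.Str.stripChars p "/") "/").getD [])))) := by
        have hc : ((u :: us).map pvBStaticPrefix).contains "" = false := by
          rw [hmapB]
          exact (Bool.eq_false_iff).mpr (fun h => hin (List.contains_iff_mem.mp h))
        unfold determine_path_prefix_alt
        rw [if_neg (by simp)]
        simp only [hc, Bool.false_eq_true, if_false]
        rw [hmapB]
        simp only [List.map_cons, pvBCommon]
      rw [hA, hB]
      -- both scans are the greatest common prefix of the same list of split paths
      have hAeq : pvAScan 0 s1 s1 s2 = pvLcp s1 s2 := by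
        have := pvAScan_eq_lcp s1 0 s1 s2 (by simp)
        simpa using this
      have hmemL : ∀ p ∈ ((PySem.Str.split? (PySem.Str.stripChars (pvAPrefix u) "/") "/").getD [])
            :: (us.map pvAPrefix).map (fun p => ((PySem.Str.split? (PySem.Str.stripChars p "/") "/").getD [])),
          pvLcp s1 s2 <+: p := by
        intro p hp
        exact pv_lex_between (pvLcp s1 s2) s1 s2 p (pvLcp_prefix_left s1 s2)
          (pvLcp_prefix_right s1 s2) (hs1min p hp) (hs2max p hp)
      obtain ⟨hBpre1, hBpre2⟩ := pvBScan_prefix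
        ((PySem.Str.split? (PySem.Str.stripChars (pvAPrefix u) "/") "/").getD []) 0
        ((us.map pvAPrefix).map (fun p => ((PySem.Str.split? (PySem.Str.stripChars p "/") "/").getD [])))
      have h1 : pvLcp s1 s2 <+: pvBScan 0
          ((PySem.Str.split? (PySem.Str.stripChars (pvAPrefix u) "/") "/").getD [])
          ((us.map pvAPrefix).map (fun p => ((PySem.Str.split? (PySem.Str.stripChars p "/") "/").getD []))) := by
        apply pvBScan_greatest
        · exact hmemL _ List.mem_cons_self
        · intro q hq
          simpa using hmemL q (List.mem_cons_of_mem _ hq)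
      have h2 : pvBScan 0
          ((PySem.Str.split? (PySem.Str.stripChars (pvAPrefix u) "/") "/").getD [])
          ((us.map pvAPrefix).map (fun p => ((PySem.Str.split? (PySem.Str.stripChars p "/") "/").getD [])))
          <+: pvLcp s1 s2 := by
        apply pvLcp_greatest
        · rcases List.mem_cons.mp hs1mem with heq | hmem
          · rw [heq]; exact hBpre1
          · simpa using hBpre2 _ hmem
        · rcases List.mem_cons.mp hs2mem with heq | hmem
          · rw [heq]; exact hBpre1
          · simpa using hBpre2 _ hmem
      rw [hAeq, pv_prefix_antisymm h1 h2]

-- ===== VERDICT (by name: the statement is the Claim_ definition above) =====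
theorem determine_path_prefix_spec : Claim_equal_determine_path_prefix := by
  intro url_paths _ hpre
  unfold Spec_determine_path_prefix
  exact pv_main url_paths hpre
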